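-- pv_equiv track=rewrite | github.com/blackshrub/FaithFlow_Enterprise-Grade-Church-Management-System | backend/services/file_upload_service.py | normalize_filename
-- ===== SOURCE A (Python) =====
-- def normalize_filename(filename: str) -> str:
--     """Normalize filename: lowercase and standardize extensions
--
--     Args:
--         filename: Original filename
--
--     Returns:
--         Normalized filename or empty string if invalid
--     """
--     if not filename or filename.startswith('.'):
--         return ''  # Skip hidden files and invalid names
--
--     # Convert to lowercase
--     filename = filename.lower()
--
--     # Standardize image extensions to .jpg
--     image_extensions = ['.jpeg', '.png', '.gif', '.bmp', '.webp']
--     for ext in image_extensions: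
--         if filename.endswith(ext):
--             # Replace extension with .jpg
--             base_name = filename[:-len(ext)]
--             filename = base_name + '.jpg'
--             break
--
--     # Standardize PDF extensions to lowercase .pdf
--     if filename.upper().endswith('.PDF'):
--         filename = filename[:-4] + '.pdf'
--
--     # Filter out non-photo/document files
--     valid_extensions = ['.jpg', '.pdf', '.doc', '.docx', '.txt']
--     if not any(filename.endswith(ext) for ext in valid_extensions):
--         return ''  # Skip non-relevant files
--
--     return filename
-- ===== SOURCE B (Python) =====
-- _IMAGE_MAP = {'jpeg': 'jpg', 'png': 'jpg', 'gif': 'jpg', 'bmp': 'jpg', 'webp': 'jpg'}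
-- _VALID = {'jpg', 'pdf', 'doc', 'docx', 'txt'}
--
--
-- def normalize_filename(filename: str) -> str:
--     if not filename or filename.startswith('.'):
--         return ''
--     filename = filename.lower()
--     base, dot, ext = filename.rpartition('.')
--     if not dot:
--         return ''
--     ext = _IMAGE_MAP.get(ext, ext)
--     if ext not in _VALID:
--         return ''
--     return base + '.' + ext
-- ===== Notes on version B (the rewrite author's own statement) =====
-- stated objective: simpler
-- what changed: Instead of A's three sequential endswith scans (five image extensions, the no-op .PDF branch, five valid extensions), B splits the filename once at its last dot with rpartition and decides everything by a dict lookup (image extension -> jpg) plus a set membership test on the final extension.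
import Mathlib
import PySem

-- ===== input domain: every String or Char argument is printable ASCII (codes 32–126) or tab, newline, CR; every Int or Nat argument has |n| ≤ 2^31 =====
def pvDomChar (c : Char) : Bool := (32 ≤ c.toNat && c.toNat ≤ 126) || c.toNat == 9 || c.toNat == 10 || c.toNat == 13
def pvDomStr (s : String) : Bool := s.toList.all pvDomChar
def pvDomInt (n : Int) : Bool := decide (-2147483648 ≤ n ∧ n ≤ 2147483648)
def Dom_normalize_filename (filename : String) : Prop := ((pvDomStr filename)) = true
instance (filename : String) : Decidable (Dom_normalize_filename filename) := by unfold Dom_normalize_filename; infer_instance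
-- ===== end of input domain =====

-- B replaces A's repeated endswith scans by one rpartition at the last dot plus a dict/set lookup on the extension (objective: simpler; same behaviour).

-- ===== PORT A =====
def pvImgExts : List (List Char) := [['.','j','p','e','g'], ['.','p','n','g'], ['.','g','i','f'], ['.','b','m','p'], ['.','w','e','b','p']]

-- the 'for ext in image_extensions: … break' loop
def pvImgLoop : List (List Char) → List Char → List Char
  | [], f => f
  | e :: rest, f =>
    if PySem.Chars.endswith f e then
      PySem.List.slice f none (some (-(e.length : Int))) ++ ['.','j','p','g']
    else pvImgLoop rest f

-- if filename.upper().endswith('.PDF'): filename = filename[:-4] + '.pdf'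
def pvPdfStep (f : List Char) : List Char :=
  if PySem.Chars.endswith (PySem.Chars.upper f) ['.','P','D','F'] then
    PySem.List.slice f none (some (-4)) ++ ['.','p','d','f']
  else f

def pvValidExts : List (List Char) := [['.','j','p','g'], ['.','p','d','f'], ['.','d','o','c'], ['.','d','o','c','x'], ['.','t','x','t']]

-- if not any(filename.endswith(ext) for ext in valid_extensions): return ''; return filename
def pvFinish (f : List Char) : String :=
  if (pvValidExts.any fun e => PySem.Chars.endswith f e) = false then "" else String.ofList f

def normalize_filename (filename : String) : String :=
  if filename = "" ∨ PySem.Str.startswith filename "." = true then ""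
  else pvFinish (pvPdfStep (pvImgLoop pvImgExts (PySem.Chars.lower filename.toList)))

-- ===== PORT B =====
-- hand port of filename.rpartition('.') specialised to the single-char separator '.':
-- scan from the right for the last '.'; none = no dot (Python's ('', '', s) case); exact there.
def pvRPartitionDot (cs : List Char) : Option (List Char × List Char) :=
  match cs.reverse.dropWhile (fun c => decide (c ≠ '.')) with
  | [] => none
  | _ :: b => some (b.reverse, (cs.reverse.takeWhile (fun c => decide (c ≠ '.'))).reverse)

def pvImageMap : PySem.Dict (List Char) (List Char) :=
  ⟨[(['j','p','e','g'], ['j','p','g']), (['p','n','g'], ['j','p','g']), (['g','i','f'], ['j','p','g']),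
    (['b','m','p'], ['j','p','g']), (['w','e','b','p'], ['j','p','g'])]⟩

def pvValidSet : PySem.Set (List Char) :=
  PySem.Set.ofList [['j','p','g'], ['p','d','f'], ['d','o','c'], ['d','o','c','x'], ['t','x','t']]

-- 'if ext not in _VALID: return ""; return base + "." + ext' (ext already rewritten by the dict)
def pvExtStep (base ext' : List Char) : String :=
  if PySem.Set.contains pvValidSet ext' = true then String.ofList (base ++ '.' :: ext') else ""

def normalize_filename_alt (filename : String) : String :=
  if filename = "" ∨ PySem.Str.startswith filename "." = true then ""
  else
    match pvRPartitionDot (PySem.Chars.lower filename.toList) with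
    | none => ""
    | some (base, ext) => pvExtStep base (PySem.Dict.getD pvImageMap ext ext)

-- ===== PRECONDITION & SPEC =====
def Spec_normalize_filename (filename : String) (out : String) : Prop := out = normalize_filename_alt filename
instance (filename : String) (out : String) : Decidable (Spec_normalize_filename filename out) := by unfold Spec_normalize_filename; infer_instance

-- ===== CLAIM (what is proved, stated in full; the proofs are below) =====
def Claim_equal_normalize_filename : Prop := ∀ (filename : String), Dom_normalize_filename filename → Spec_normalize_filename filename (normalize_filename filename)

-- ===== LEMMAS AND PROOFS =====

theorem pvChar_toNat_inj {a b : Char} (h : a.toNat = b.toNat) : a = b := by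
  rw [← Char.ofNat_toNat a, ← Char.ofNat_toNat b, h]

theorem pvToNat_ofNat {n : Nat} (h : n < 55296) : (Char.ofNat n).toNat = n := by
  rw [Char.toNat_ofNat]; simp [Nat.isValidChar]; omega

theorem pvIsupper_iff (c : Char) : PySem.Chars.isupper c = true ↔ 65 ≤ c.toNat ∧ c.toNat ≤ 90 := by
  simp only [PySem.Chars.isupper, Bool.and_eq_true, decide_eq_true_eq, Char.le_def,
    UInt32.le_iff_toNat_le]
  exact Iff.rfl

theorem pvIslower_iff (c : Char) : PySem.Chars.islower c = true ↔ 97 ≤ c.toNat ∧ c.toNat ≤ 122 := by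
  simp only [PySem.Chars.islower, Bool.and_eq_true, decide_eq_true_eq, Char.le_def,
    UInt32.le_iff_toNat_le]
  exact Iff.rfl

theorem pvLowerChar_not_upper (c : Char) : PySem.Chars.isupper (PySem.Chars.lowerChar c) = false := by
  unfold PySem.Chars.lowerChar
  by_cases h : PySem.Chars.isupper c = true
  · rw [if_pos h]
    rw [pvIsupper_iff] at h
    have h2 : (Char.ofNat (c.toNat + 32)).toNat = c.toNat + 32 := pvToNat_ofNat (by omega)
    rw [Bool.eq_false_iff]; intro hc
    rw [pvIsupper_iff, h2] at hc; omega
  · rw [if_neg h]; simpa using h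

theorem pvUpperChar_inv {c : Char} (h : PySem.Chars.isupper c = false) {X : Char}
    (he : PySem.Chars.upperChar c = X) : c = PySem.Chars.lowerChar X := by
  unfold PySem.Chars.upperChar at he
  by_cases hl : PySem.Chars.islower c = true
  · rw [if_pos hl] at he
    rw [pvIslower_iff] at hl
    have h2 : (Char.ofNat (c.toNat - 32)).toNat = c.toNat - 32 := pvToNat_ofNat (by omega)
    have hX : X.toNat = c.toNat - 32 := by rw [← he, h2]
    unfold PySem.Chars.lowerChar
    rw [if_pos (by rw [pvIsupper_iff]; omega)]
    exact pvChar_toNat_inj (by rw [pvToNat_ofNat (by omega)]; omega)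
  · rw [if_neg hl] at he
    subst he
    unfold PySem.Chars.lowerChar
    rw [if_neg (by simp [h])]

theorem pvLF_lower (l : List Char) : ∀ c ∈ PySem.Chars.lower l, PySem.Chars.isupper c = false := by
  intro c hc
  simp only [PySem.Chars.lower, List.mem_map] at hc
  obtain ⟨d, _, rfl⟩ := hc
  exact pvLowerChar_not_upper d

-- no-dot strings: every '.xyz' endswith test is false
theorem pvEndswith_nodot {f : List Char} (hnd : '.' ∉ f) (v : List Char) :
    PySem.Chars.endswith f ('.' :: v) = false := by
  rw [Bool.eq_false_iff]; intro h
  rw [PySem.Chars.endswith_iff] at h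
  exact hnd (h.mem (by simp))

theorem pvTakeWhile_dot (l t : List Char) (hl : '.' ∉ l) :
    (l ++ '.' :: t).takeWhile (fun c => decide (c ≠ '.')) = l := by
  induction l with
  | nil => rw [List.nil_append, List.takeWhile_cons_of_neg (by simp)]
  | cons a l ih =>
    simp only [List.mem_cons, not_or] at hl
    rw [List.cons_append, List.takeWhile_cons_of_pos (by simpa using Ne.symm hl.1), ih hl.2]

theorem pvRPartitionDot_none {cs : List Char} (h : pvRPartitionDot cs = none) : '.' ∉ cs := by
  unfold pvRPartitionDot at h
  intro hmem
  cases hd : cs.reverse.dropWhile (fun c => decide (c ≠ '.')) with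
  | cons a b => rw [hd] at h; simp at h
  | nil =>
    have hm : '.' ∈ cs.reverse.takeWhile (fun c => decide (c ≠ '.')) := by
      rw [← List.mem_reverse] at hmem
      rw [← List.takeWhile_append_dropWhile (p := fun c => decide (c ≠ '.')) (l := cs.reverse), hd] at hmem
      simpa using hmem
    have := List.mem_takeWhile_imp hm
    simp at this

theorem pvRPartitionDot_some {cs b w : List Char} (h : pvRPartitionDot cs = some (b, w)) :
    cs = b ++ '.' :: w ∧ '.' ∉ w := by
  unfold pvRPartitionDot at h
  cases hd : cs.reverse.dropWhile (fun c => decide (c ≠ '.')) with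
  | nil => rw [hd] at h; simp at h
  | cons a r =>
    rw [hd] at h
    simp only [Option.some.injEq, Prod.mk.injEq] at h
    have ha : a = '.' := by
      have hne : cs.reverse.dropWhile (fun c => decide (c ≠ '.')) ≠ [] := by rw [hd]; simp
      have := List.head_dropWhile_not (fun c => decide (c ≠ '.')) hne
      simp only [hd, List.head_cons, decide_eq_false_iff_not, not_not] at this
      exact this
    have hw : '.' ∉ cs.reverse.takeWhile (fun c => decide (c ≠ '.')) := by
      intro hm; have := List.mem_takeWhile_imp hm; simp at this
    have hcs : cs.reverse = cs.reverse.takeWhile (fun c => decide (c ≠ '.')) ++ '.' :: r := by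
      conv_lhs => rw [← List.takeWhile_append_dropWhile (p := fun c => decide (c ≠ '.')) (l := cs.reverse), hd, ha]
    constructor
    · rw [← h.1, ← h.2]
      have := congrArg List.reverse hcs
      simpa using this
    · rw [← h.2]; simpa using hw

-- the central suffix lemma: with no dot in w or v, (b ++ '.'::w).endswith('.'::v) tests v = w
theorem pvEndswith_split (b w v : List Char) (hw : '.' ∉ w) (hv : '.' ∉ v) :
    PySem.Chars.endswith (b ++ '.' :: w) ('.' :: v) = decide (v = w) := by
  by_cases h : v = w
  · subst h
    simp only [decide_true]
    rw [PySem.Chars.endswith_iff]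
    exact ⟨b, rfl⟩
  · simp only [h, decide_false]
    rw [Bool.eq_false_iff]
    intro hc
    rw [PySem.Chars.endswith_iff] at hc
    obtain ⟨u, hu⟩ := hc
    have hrev := congrArg List.reverse hu
    simp only [List.reverse_append, List.reverse_cons] at hrev
    have h1 : (v.reverse ++ '.' :: u.reverse).takeWhile (fun c => decide (c ≠ '.')) = v.reverse :=
      pvTakeWhile_dot _ _ (by simpa using hv)
    have h2 : (w.reverse ++ '.' :: b.reverse).takeWhile (fun c => decide (c ≠ '.')) = w.reverse :=
      pvTakeWhile_dot _ _ (by simpa using hw)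
    apply h
    have hvw : v.reverse = w.reverse := by
      rw [← h1, ← h2]
      congr 1
      simpa using hrev
    simpa using List.reverse_injective hvw

def pvImageNames : List (List Char) := [['j','p','e','g'], ['p','n','g'], ['g','i','f'], ['b','m','p'], ['w','e','b','p']]
def pvValidNames : List (List Char) := [['j','p','g'], ['p','d','f'], ['d','o','c'], ['d','o','c','x'], ['t','x','t']]

theorem pvSlice_drop (b t : List Char) (k : Nat) (hk : 1 < k) (ht : t.length = k) :
    PySem.List.slice (b ++ t) none (some (-(OfNat.ofNat k))) = b := by
  rw [PySem.List.slice_to_neg_ofNat _ k hk]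
  have : (b ++ t).length - k = b.length := by simp [ht]
  rw [this, List.take_left]

theorem pvImgLoop_nodot {f : List Char} (hnd : '.' ∉ f) : pvImgLoop pvImgExts f = f := by
  simp [pvImgLoop, pvImgExts,
    pvEndswith_nodot hnd ['j','p','e','g'], pvEndswith_nodot hnd ['p','n','g'],
    pvEndswith_nodot hnd ['g','i','f'], pvEndswith_nodot hnd ['b','m','p'],
    pvEndswith_nodot hnd ['w','e','b','p']]

theorem pvImgLoop_split (b w : List Char) (hw : '.' ∉ w) :
    pvImgLoop pvImgExts (b ++ '.' :: w) =
      if w ∈ pvImageNames then b ++ ['.','j','p','g'] else b ++ '.' :: w := by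
  have e1 := pvEndswith_split b w ['j','p','e','g'] hw (by decide)
  have e2 := pvEndswith_split b w ['p','n','g'] hw (by decide)
  have e3 := pvEndswith_split b w ['g','i','f'] hw (by decide)
  have e4 := pvEndswith_split b w ['b','m','p'] hw (by decide)
  have e5 := pvEndswith_split b w ['w','e','b','p'] hw (by decide)
  simp only [pvImgLoop, pvImgExts, e1, e2, e3, e4, e5, pvImageNames, List.mem_cons,
    List.not_mem_nil, or_false]
  by_cases h1 : w = ['j','p','e','g']
  · subst h1; simp [pvSlice_drop b ['.','j','p','e','g'] 5 (by omega) rfl]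
  by_cases h2 : w = ['p','n','g']
  · subst h2; simp [pvSlice_drop b ['.','p','n','g'] 4 (by omega) rfl]
  by_cases h3 : w = ['g','i','f']
  · subst h3; simp [pvSlice_drop b ['.','g','i','f'] 4 (by omega) rfl]
  by_cases h4 : w = ['b','m','p']
  · subst h4; simp [pvSlice_drop b ['.','b','m','p'] 4 (by omega) rfl]
  by_cases h5 : w = ['w','e','b','p']
  · subst h5; simp [pvSlice_drop b ['.','w','e','b','p'] 5 (by omega) rfl]
  simp [Ne.symm h1, Ne.symm h2, Ne.symm h3, Ne.symm h4, Ne.symm h5, h1, h2, h3, h4, h5]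

-- the PDF branch is the identity on strings with no uppercase letters
theorem pvPdfStep_id {f : List Char} (hLF : ∀ c ∈ f, PySem.Chars.isupper c = false) :
    pvPdfStep f = f := by
  unfold pvPdfStep
  by_cases h : PySem.Chars.endswith (PySem.Chars.upper f) ['.','P','D','F'] = true
  · rw [if_pos h]
    rw [PySem.Chars.endswith_iff] at h
    obtain ⟨u, hu⟩ := h
    unfold PySem.Chars.upper at hu
    obtain ⟨l₁, l₂, hf, hm1, hm2⟩ := List.map_eq_append_iff.mp hu.symm
    cases l₂ with
    | nil => simp at hm2
    | cons c1 r1 =>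
    cases r1 with
    | nil => simp at hm2
    | cons c2 r2 =>
    cases r2 with
    | nil => simp at hm2
    | cons c3 r3 =>
    cases r3 with
    | nil => simp at hm2
    | cons c4 r4 =>
    cases r4 with
    | cons c5 r5 => simp at hm2
    | nil =>
      simp only [List.map_cons, List.map_nil, List.cons.injEq, and_true] at hm2
      obtain ⟨g1, g2, g3, g4⟩ := hm2
      have hc1 : c1 = '.' := by
        have := pvUpperChar_inv (hLF c1 (by rw [hf]; simp)) g1
        rw [this]; decide
      have hc2 : c2 = 'p' := by
        have := pvUpperChar_inv (hLF c2 (by rw [hf]; simp)) g2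
        rw [this]; decide
      have hc3 : c3 = 'd' := by
        have := pvUpperChar_inv (hLF c3 (by rw [hf]; simp)) g3
        rw [this]; decide
      have hc4 : c4 = 'f' := by
        have := pvUpperChar_inv (hLF c4 (by rw [hf]; simp)) g4
        rw [this]; decide
      subst hc1; subst hc2; subst hc3; subst hc4
      rw [hf]
      rw [pvSlice_drop l₁ ['.','p','d','f'] 4 (by omega) rfl]
  · rw [if_neg h]

theorem pvFinish_nodot {f : List Char} (hnd : '.' ∉ f) : pvFinish f = "" := by
  simp [pvFinish, pvValidExts,
    pvEndswith_nodot hnd ['j','p','g'], pvEndswith_nodot hnd ['p','d','f'],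
    pvEndswith_nodot hnd ['d','o','c'], pvEndswith_nodot hnd ['d','o','c','x'],
    pvEndswith_nodot hnd ['t','x','t']]

theorem pvFinish_split (b w : List Char) (hw : '.' ∉ w) :
    pvFinish (b ++ '.' :: w) = if w ∈ pvValidNames then String.ofList (b ++ '.' :: w) else "" := by
  have e1 := pvEndswith_split b w ['j','p','g'] hw (by decide)
  have e2 := pvEndswith_split b w ['p','d','f'] hw (by decide)
  have e3 := pvEndswith_split b w ['d','o','c'] hw (by decide)
  have e4 := pvEndswith_split b w ['d','o','c','x'] hw (by decide)
  have e5 := pvEndswith_split b w ['t','x','t'] hw (by decide)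
  simp only [pvFinish, pvValidExts, List.any_cons, List.any_nil, e1, e2, e3, e4, e5,
    pvValidNames, List.mem_cons, List.not_mem_nil, or_false]
  by_cases h1 : w = ['j','p','g']
  · subst h1; simp
  by_cases h2 : w = ['p','d','f']
  · subst h2; simp
  by_cases h3 : w = ['d','o','c']
  · subst h3; simp
  by_cases h4 : w = ['d','o','c','x']
  · subst h4; simp
  by_cases h5 : w = ['t','x','t']
  · subst h5; simp
  simp [Ne.symm h1, Ne.symm h2, Ne.symm h3, Ne.symm h4, Ne.symm h5, h1, h2, h3, h4, h5]

theorem pvGetD_not_image {w : List Char} (h : w ∉ pvImageNames) :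
    PySem.Dict.getD pvImageMap w w = w := by
  simp only [pvImageNames, List.mem_cons, List.not_mem_nil, or_false, not_or] at h
  obtain ⟨h1, h2, h3, h4, h5⟩ := h
  simp [PySem.Dict.getD, PySem.Dict.get?, pvImageMap, List.find?,
    show (['j','p','e','g'] == w) = false by simpa using fun hh => h1 hh.symm,
    show (['p','n','g'] == w) = false by simpa using fun hh => h2 hh.symm,
    show (['g','i','f'] == w) = false by simpa using fun hh => h3 hh.symm,
    show (['b','m','p'] == w) = false by simpa using fun hh => h4 hh.symm,
    show (['w','e','b','p'] == w) = false by simpa using fun hh => h5 hh.symm]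

theorem pvContains_iff (w : List Char) :
    PySem.Set.contains pvValidSet w = decide (w ∈ pvValidNames) := by
  by_cases h : w ∈ pvValidNames
  · simp only [pvValidNames, List.mem_cons, List.not_mem_nil, or_false] at h
    rcases h with rfl | rfl | rfl | rfl | rfl <;> decide
  · have hh := h
    simp only [pvValidNames, List.mem_cons, List.not_mem_nil, or_false, not_or] at hh
    obtain ⟨h1, h2, h3, h4, h5⟩ := hh
    simp only [h, decide_false]
    simp [PySem.Set.contains, pvValidSet, PySem.Set.ofList, List.contains, List.elem,
      show (w == ['j','p','g']) = false by simpa using h1,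
      show (w == ['p','d','f']) = false by simpa using h2,
      show (w == ['d','o','c']) = false by simpa using h3,
      show (w == ['d','o','c','x']) = false by simpa using h4,
      show (w == ['t','x','t']) = false by simpa using h5]

-- ===== VERDICT (by name: the statement is the Claim_ definition above) =====
theorem normalize_filename_spec : Claim_equal_normalize_filename := by
  intro filename _
  unfold Spec_normalize_filename normalize_filename normalize_filename_alt
  by_cases hg : filename = "" ∨ PySem.Str.startswith filename "." = true
  · rw [if_pos hg, if_pos hg]
  · rw [if_neg hg, if_neg hg]
    have hLF : ∀ c ∈ PySem.Chars.lower filename.toList, PySem.Chars.isupper c = false :=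
      pvLF_lower filename.toList
    cases hrp : pvRPartitionDot (PySem.Chars.lower filename.toList) with
    | none =>
      have hnd := pvRPartitionDot_none hrp
      rw [pvImgLoop_nodot hnd, pvPdfStep_id hLF, pvFinish_nodot hnd]
    | some p =>
      obtain ⟨b, w⟩ := p
      obtain ⟨hf, hw⟩ := pvRPartitionDot_some hrp
      rw [hf] at hLF ⊢
      show pvFinish (pvPdfStep (pvImgLoop pvImgExts (b ++ '.' :: w)))
        = pvExtStep b (PySem.Dict.getD pvImageMap w w)
      rw [pvImgLoop_split b w hw]
      by_cases hi : w ∈ pvImageNames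
      · rw [if_pos hi]
        have hLF' : ∀ c ∈ b ++ ['.','j','p','g'], PySem.Chars.isupper c = false := by
          intro c hc
          rcases List.mem_append.mp hc with hcb | hcj
          · exact hLF c (List.mem_append.mpr (Or.inl hcb))
          · simp only [List.mem_cons, List.not_mem_nil, or_false] at hcj
            rcases hcj with rfl | rfl | rfl | rfl <;> decide
        rw [pvPdfStep_id hLF']
        have hjpg : (b ++ ['.','j','p','g'] : List Char) = b ++ '.' :: ['j','p','g'] := rfl
        rw [hjpg, pvFinish_split b ['j','p','g'] (by decide)]
        have hget : PySem.Dict.getD pvImageMap w w = ['j','p','g'] := by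
          simp only [pvImageNames, List.mem_cons, List.not_mem_nil, or_false] at hi
          rcases hi with rfl | rfl | rfl | rfl | rfl <;> rfl
        rw [hget]
        rw [if_pos (by decide)]
        unfold pvExtStep
        rw [if_pos (by decide)]
      · rw [if_neg hi]
        rw [pvPdfStep_id hLF, pvFinish_split b w hw, pvGetD_not_image hi]
        unfold pvExtStep
        rw [pvContains_iff]
        by_cases hv : w ∈ pvValidNames
        · rw [if_pos hv, if_pos (by simpa using hv)]
        · rw [if_neg hv, if_neg (by simpa using hv)]
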